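-- pv_equiv track=rewrite | github.com/manu-180/hunter-bot-worker | src/web_verification.py | _is_platform_domain
-- ===== SOURCE A (Python) =====
-- _PLATFORM_KEYWORDS = frozenset({
--     # Redes sociales
--     "facebook", "instagram", "twitter", "linkedin", "youtube",
--     "tiktok", "pinterest", "whatsapp", "telegram", "snapchat",
--     "threads", "reddit",
--     # Google
--     "google", "goo.gl", "googleapis",
--     # Directorios y reviews
--     "yelp", "tripadvisor", "foursquare", "paginasamarillas",
--     "guialocal", "cylex", "infoisinfo", "tupalo", "hotfrog",
--     "brownbook", "tuugo", "findglocal", "yellowpages",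
--     "whitepages", "superpages", "citysearch", "kompass",
--     "europages", "manta", "bbb.org", "chamberofcommerce",
--     "alignable", "merchantcircle", "showmelocal",
--     # Portales inmobiliarios
--     "zonaprop", "argenprop", "properati", "inmuebles24",
--     "metrocuadrado", "fincaraiz", "lamudi",
--     # Marketplaces
--     "mercadolibre", "olx", "ebay", "amazon",
--     # Booking / viajes
--     "booking", "airbnb", "despegar", "expedia", "trivago",
--     "almundo", "decolar",
--     # Delivery / transporte
--     "pedidosya", "rappi", "uber", "cabify", "didi",
--     # Directorios médicos
--     "doctoralia", "doctoranytime", "topdoctors", "zocdoc", "practo",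
--     # Noticias
--     "clarin", "lanacion", "infobae", "pagina12", "lavoz",
--     "telam", "perfil", "ambito", "cronista",
--     # Referencia
--     "wikipedia", "wikidata",
--     # Empleo
--     "zonajobs", "computrabajo", "bumeran", "indeed", "glassdoor",
-- })
--
-- _GOV_EDU_PATTERNS = (".gob.", ".gov.", ".edu.", ".mil.", ".ac.")
--
-- def _is_platform_domain(domain: str) -> bool:
--     """True si el dominio pertenece a una plataforma conocida (no es web propia)."""
--     dl = domain.lower()
--     for kw in _PLATFORM_KEYWORDS:
--         if kw in dl:
--             return True
--     for pat in _GOV_EDU_PATTERNS: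
--         if pat in dl:
--             return True
--     return False
-- ===== SOURCE B (Python) =====
-- # B: one left-to-right scan over the domain; the known needles (platform
-- # keywords + gov/edu patterns) are kept as a single '|'-joined blob, split
-- # once at import time and bucketed by first character; at each position of
-- # the domain only that character's bucket is tried with startswith
-- # (position-major scan instead of A's keyword-major substring search).
-- _NEEDLE_BLOB = (
--     "facebook|instagram|twitter|linkedin|youtube|tiktok|pinterest|whatsapp|"
--     "telegram|snapchat|threads|reddit|google|goo.gl|googleapis|yelp|"
--     "tripadvisor|foursquare|paginasamarillas|guialocal|cylex|infoisinfo|"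
--     "tupalo|hotfrog|brownbook|tuugo|findglocal|yellowpages|whitepages|"
--     "superpages|citysearch|kompass|europages|manta|bbb.org|chamberofcommerce|"
--     "alignable|merchantcircle|showmelocal|zonaprop|argenprop|properati|"
--     "inmuebles24|metrocuadrado|fincaraiz|lamudi|mercadolibre|olx|ebay|amazon|"
--     "booking|airbnb|despegar|expedia|trivago|almundo|decolar|pedidosya|rappi|"
--     "uber|cabify|didi|doctoralia|doctoranytime|topdoctors|zocdoc|practo|"
--     "clarin|lanacion|infobae|pagina12|lavoz|telam|perfil|ambito|cronista|"
--     "wikipedia|wikidata|zonajobs|computrabajo|bumeran|indeed|glassdoor|"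
--     ".gob.|.gov.|.edu.|.mil.|.ac."
-- )
--
-- _BY_FIRST = {}
-- for _kw in _NEEDLE_BLOB.split("|"):
--     _BY_FIRST.setdefault(_kw[0], []).append(_kw)
--
--
-- def _is_platform_domain(domain: str) -> bool:
--     """True si el dominio pertenece a una plataforma conocida (no es web propia)."""
--     dl = domain.lower()
--     for i, ch in enumerate(dl):
--         for kw in _BY_FIRST.get(ch, ()):
--             if dl.startswith(kw, i):
--                 return True
--     return False
-- ===== Notes on version B (the rewrite author's own statement) =====
-- stated objective: alternative
-- what changed: Replaces the keyword-major search (one substring scan of the domain per ~90 needles) by a single position-major scan of the domain that, at each position, tries only the needles bucketed under that position's first character; the needles themselves are stored as one joined string split once at import time.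
import Mathlib
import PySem

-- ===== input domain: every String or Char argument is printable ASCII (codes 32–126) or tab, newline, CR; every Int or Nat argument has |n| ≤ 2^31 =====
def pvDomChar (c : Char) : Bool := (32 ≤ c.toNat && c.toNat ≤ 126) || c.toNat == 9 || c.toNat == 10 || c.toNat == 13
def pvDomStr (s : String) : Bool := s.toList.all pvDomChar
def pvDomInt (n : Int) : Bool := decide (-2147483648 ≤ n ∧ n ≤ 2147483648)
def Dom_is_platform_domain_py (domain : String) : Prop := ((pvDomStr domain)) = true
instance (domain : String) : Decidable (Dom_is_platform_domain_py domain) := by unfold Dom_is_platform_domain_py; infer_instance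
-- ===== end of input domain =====

-- B replaces A's keyword-major substring search by a single position-major scan of the
-- domain with the needles (stored as one '|'-joined blob, split once) bucketed by first
-- character (alternative algorithm, same results).

-- ===== PORT A =====
-- the frozenset of platform keywords, in source order (A's result is order-independent)
def pvKwA : List String := ["facebook", "instagram", "twitter", "linkedin", "youtube", "tiktok", "pinterest", "whatsapp", "telegram", "snapchat", "threads", "reddit", "google", "goo.gl", "googleapis", "yelp", "tripadvisor", "foursquare", "paginasamarillas", "guialocal", "cylex", "infoisinfo", "tupalo", "hotfrog", "brownbook", "tuugo", "findglocal", "yellowpages", "whitepages", "superpages", "citysearch", "kompass", "europages", "manta", "bbb.org", "chamberofcommerce", "alignable", "merchantcircle", "showmelocal", "zonaprop", "argenprop", "properati", "inmuebles24", "metrocuadrado", "fincaraiz", "lamudi", "mercadolibre", "olx", "ebay", "amazon", "booking", "airbnb", "despegar", "expedia", "trivago", "almundo", "decolar", "pedidosya", "rappi", "uber", "cabify", "didi", "doctoralia", "doctoranytime", "topdoctors", "zocdoc", "practo", "clarin", "lanacion", "infobae", "pagina12", "lavoz", "telam", "perfil", "ambito", "cronista", "wikipedia", "wikidata", "zonajobs",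 "computrabajo", "bumeran", "indeed", "glassdoor"]

def pvPatA : List String := [".gob.", ".gov.", ".edu.", ".mil.", ".ac."]

-- 'for kw in …: if kw in dl: return True', falling through
def pvLoopA (dl : String) : List String → Bool
  | [] => false
  | kw :: rest => if PySem.Str.isIn kw dl then true else pvLoopA dl rest

def is_platform_domain_py (domain : String) : Bool :=
  let dl := PySem.Str.lower domain
  if pvLoopA dl pvKwA then true
  else if pvLoopA dl pvPatA then true
  else false

-- ===== PORT B =====
-- _NEEDLE_BLOB: all needles joined by '|'
def pvNeedleBlob : String := "facebook|instagram|twitter|linkedin|youtube|tiktok|pinterest|whatsapp|telegram|snapchat|threads|reddit|google|goo.gl|googleapis|yelp|tripadvisor|foursquare|paginasamarillas|guialocal|cylex|infoisinfo|tupalo|hotfrog|brownbook|tuugo|findglocal|yellowpages|whitepages|superpages|citysearch|kompass|europages|manta|bbb.org|chamberofcommerce|alignable|merchantcircle|showmelocal|zonaprop|argenprop|properati|inmuebles24|metrocuadrado|fincaraiz|lamudi|mercadolibre|olx|ebay|amazon|booking|airbnb|despegar|expedia|trivago|almundo|decolar|pedidosya|rappi|uber|cabify|didi|doctoralia|doc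toranytime|topdoctors|zocdoc|practo|clarin|lanacion|infobae|pagina12|lavoz|telam|perfil|ambito|cronista|wikipedia|wikidata|zonajobs|computrabajo|bumeran|indeed|glassdoor|.gob.|.gov.|.edu.|.mil.|.ac."

-- _NEEDLE_BLOB.split('|'); split? is none only for an empty separator, so .getD [] is exact
def pvAllNeedles : List String := (PySem.Str.split? pvNeedleBlob "|").getD []

-- _BY_FIRST: d.setdefault(kw[0], []).append(kw); kw[0] would raise on an empty
-- needle, but no needle is empty, so the [] branch is unreachable
def pvBuckets : PySem.Dict Char (List String) :=
  pvAllNeedles.foldl (fun d kw =>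
    match kw.toList with
    | [] => d
    | c :: _ => d.insert c (d.getD c [] ++ [kw])) PySem.Dict.empty

-- 'for kw in _BY_FIRST.get(ch, ()): if dl.startswith(kw, i): return True';
-- dl.startswith(kw, i) with 0 ≤ i ≤ len(dl) is exactly: kw is a prefix of dl[i:]
def pvInnerB (dl : List Char) (i : Nat) : List String → Bool
  | [] => false
  | kw :: rest =>
      if PySem.Chars.startswith (dl.drop i) kw.toList then true else pvInnerB dl i rest

-- 'for i, ch in enumerate(dl): …' — walks the suffix, i is the current index
def pvScanB (dl : List Char) : List Char → Nat → Bool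
  | [], _ => false
  | c :: rest, i =>
      if pvInnerB dl i (pvBuckets.getD c []) then true
      else pvScanB dl rest (i + 1)

def is_platform_domain_py_alt (domain : String) : Bool :=
  let dl := (PySem.Str.lower domain).toList
  pvScanB dl dl 0

-- ===== PRECONDITION & SPEC =====
def Spec_is_platform_domain_py (domain : String) (out : Bool) : Prop := out = is_platform_domain_py_alt domain
instance (domain : String) (out : Bool) : Decidable (Spec_is_platform_domain_py domain out) := by unfold Spec_is_platform_domain_py; infer_instance

-- ===== CLAIM (what is proved, stated in full; the proofs are below) =====
def Claim_equal_is_platform_domain_py : Prop := ∀ (domain : String), Dom_is_platform_domain_py domain → Spec_is_platform_domain_py domain (is_platform_domain_py domain)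

-- ===== LEMMAS AND PROOFS =====

theorem pvLoopA_iff (dl : String) (l : List String) :
    pvLoopA dl l = true ↔ ∃ kw ∈ l, PySem.Str.isIn kw dl = true := by
  induction l with
  | nil => simp [pvLoopA]
  | cons kw rest ih =>
      by_cases h : PySem.Chars.isIn kw.toList dl.toList = true
      · simp [pvLoopA, h]
      · simp [pvLoopA, h, ih]

theorem pvInnerB_iff (dl : List Char) (i : Nat) (l : List String) :
    pvInnerB dl i l = true ↔ ∃ kw ∈ l, PySem.Chars.startswith (dl.drop i) kw.toList = true := by
  induction l with
  | nil => simp [pvInnerB]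
  | cons kw rest ih =>
      by_cases h : PySem.Chars.startswith (dl.drop i) kw.toList = true <;>
        simp [pvInnerB, h, ih]

theorem pvScanB_iff (dl : List Char) (rest : List Char) (i : Nat) :
    pvScanB dl rest i = true ↔
      ∃ j : Nat, ∃ h : j < rest.length,
        pvInnerB dl (i + j) (pvBuckets.getD rest[j] []) = true := by
  induction rest generalizing i with
  | nil => simp [pvScanB]
  | cons c tl ih =>
      cases h : pvInnerB dl i (pvBuckets.getD c []) with
      | true =>
          simp only [pvScanB, h, if_true]
          exact iff_of_true trivial ⟨0, by simp, by simpa using h⟩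
      | false =>
          have hstep : pvScanB dl (c :: tl) i = pvScanB dl tl (i + 1) := by
            simp [pvScanB, h]
          rw [hstep, ih]
          constructor
          · rintro ⟨j, hj, hin⟩
            refine ⟨j + 1, by simpa using Nat.succ_lt_succ hj, ?_⟩
            have e : i + (j + 1) = i + 1 + j := by omega
            simpa [e] using hin
          · rintro ⟨j, hj, hin⟩
            cases j with
            | zero => exact absurd (by simpa using hin) (by simp [h])
            | succ j =>
                refine ⟨j, Nat.lt_of_succ_lt_succ (by simpa using hj), ?_⟩
                have e : i + 1 + j = i + (j + 1) := by omega
                simpa [e] using hin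

set_option maxRecDepth 1000000 in
set_option maxHeartbeats 2000000 in
theorem pvAll_eq : pvAllNeedles = pvKwA ++ pvPatA := by decide

theorem pvBuckets_eq : pvBuckets = (pvKwA ++ pvPatA).foldl (fun d kw =>
    match kw.toList with
    | [] => d
    | c :: _ => d.insert c (d.getD c [] ++ [kw])) PySem.Dict.empty := by
  unfold pvBuckets; rw [pvAll_eq]

-- every needle is nonempty and sits in the bucket of its first character
set_option maxRecDepth 16000 in
theorem pvFact1 : (pvAllNeedles.all (fun kw =>
    !kw.toList.isEmpty && (pvBuckets.getD kw.toList.head! []).contains kw)) = true := by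
  rw [pvAll_eq, pvBuckets_eq]; rfl

-- every bucket member is one of the needles
set_option maxRecDepth 16000 in
theorem pvFact2 : (pvBuckets.keys.all (fun c =>
    (pvBuckets.getD c []).all (fun kw => pvAllNeedles.contains kw))) = true := by
  rw [pvAll_eq, pvBuckets_eq]; rfl

theorem pvMem_keys_of_mem_getD (c : Char) (kw : String)
    (h : kw ∈ pvBuckets.getD c []) : c ∈ pvBuckets.keys := by
  by_cases hc : pvBuckets.contains c = true
  · exact (PySem.Dict.contains_iff_mem_keys _ _).mp hc
  · rw [PySem.Dict.getD_of_not_contains _ _ (by simpa using hc)] at h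
    simp at h

theorem pvMain (dl : String) :
    (if pvLoopA dl pvKwA then true else if pvLoopA dl pvPatA then true else false)
      = pvScanB dl.toList dl.toList 0 := by
  have hA : (if pvLoopA dl pvKwA then true else if pvLoopA dl pvPatA then true else false) = true
      ↔ ∃ kw ∈ pvKwA ++ pvPatA, kw.toList <:+: dl.toList := by
    constructor
    · intro h
      by_cases h1 : pvLoopA dl pvKwA = true
      · obtain ⟨kw, hm, hin⟩ := (pvLoopA_iff dl pvKwA).mp h1
        exact ⟨kw, List.mem_append_left _ hm, (PySem.Str.isIn_iff_infix _ _).mp hin⟩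
      · by_cases h2 : pvLoopA dl pvPatA = true
        · obtain ⟨kw, hm, hin⟩ := (pvLoopA_iff dl pvPatA).mp h2
          exact ⟨kw, List.mem_append_right _ hm, (PySem.Str.isIn_iff_infix _ _).mp hin⟩
        · rw [if_neg h1, if_neg h2] at h
          exact absurd h (by simp)
    · rintro ⟨kw, hm, hinf⟩
      have hin : PySem.Str.isIn kw dl = true := (PySem.Str.isIn_iff_infix _ _).mpr hinf
      rcases List.mem_append.mp hm with hm | hm
      · simp [(pvLoopA_iff dl pvKwA).mpr ⟨kw, hm, hin⟩]
      · have h2 := (pvLoopA_iff dl pvPatA).mpr ⟨kw, hm, hin⟩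
        by_cases h1 : pvLoopA dl pvKwA = true <;> simp [h1, h2]
  have hB : pvScanB dl.toList dl.toList 0 = true
      ↔ ∃ kw ∈ pvKwA ++ pvPatA, kw.toList <:+: dl.toList := by
    rw [pvScanB_iff]
    constructor
    · rintro ⟨j, hj, hin⟩
      obtain ⟨kw, hkw, hpre⟩ := (pvInnerB_iff _ _ _).mp hin
      have hkeys := pvMem_keys_of_mem_getD _ _ hkw
      have hmem : kw ∈ pvAllNeedles := by
        have := (List.all_eq_true.mp pvFact2) _ hkeys
        have := (List.all_eq_true.mp this) _ hkw
        exact List.contains_iff_mem.mp this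
      refine ⟨kw, by rwa [← pvAll_eq], ?_⟩
      obtain ⟨t, ht⟩ := (PySem.Chars.startswith_iff _ _).mp (by simpa using hpre)
      exact ⟨dl.toList.take j, t, by rw [List.append_assoc, ht, List.take_append_drop]⟩
    · rintro ⟨kw, hm, hinf⟩
      have hmem : kw ∈ pvAllNeedles := by rwa [pvAll_eq]
      have h1 := (List.all_eq_true.mp pvFact1) _ hmem
      rw [Bool.and_eq_true] at h1
      have hne : kw.toList ≠ [] := by
        simpa using h1.1
      have hbkt : kw ∈ pvBuckets.getD kw.toList.head! [] :=
        List.contains_iff_mem.mp h1.2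
      obtain ⟨s, t, hst⟩ := hinf
      have hk : 0 < kw.toList.length := List.length_pos_iff.mpr hne
      have hst' : s ++ (kw.toList ++ t) = dl.toList := by
        rw [← List.append_assoc]; exact hst
      have hdrop : dl.toList.drop s.length = kw.toList ++ t := by
        rw [← hst', List.drop_left]
      have hlen : s.length < dl.toList.length := by
        have := congrArg List.length hst'
        simp only [List.length_append] at this
        omega
      refine ⟨s.length, hlen, ?_⟩
      obtain ⟨c, ctl, hkw⟩ := List.exists_cons_of_ne_nil hne
      have hget : dl.toList[s.length]'hlen = c := by
        have h0 : (dl.toList.drop s.length)[0]'(by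
            rw [hdrop]; simp only [List.length_append]; omega) = c := by
          simp [hdrop, hkw]
        rw [List.getElem_drop] at h0
        simpa using h0
      rw [pvInnerB_iff]
      refine ⟨kw, by rw [hget]; simpa [hkw] using hbkt, ?_⟩
      rw [PySem.Chars.startswith_iff]
      simp only [Nat.zero_add]
      exact ⟨t, hdrop.symm⟩
  by_cases h : pvScanB dl.toList dl.toList 0 = true
  · rw [h, hA.mpr (hB.mp h)]
  · by_cases h2 : (if pvLoopA dl pvKwA then true else if pvLoopA dl pvPatA then true else false) = true
    · exact absurd (hB.mpr (hA.mp h2)) h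
    · rw [Bool.not_eq_true] at h h2
      rw [h, h2]

-- ===== VERDICT (by name: the statement is the Claim_ definition above) =====
theorem is_platform_domain_py_spec : Claim_equal_is_platform_domain_py := by
  intro domain _
  unfold Spec_is_platform_domain_py is_platform_domain_py is_platform_domain_py_alt
  exact pvMain (PySem.Str.lower domain)
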